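-- pv_equiv track=rewrite | github.com/Sopraz/Work | Exercices Dossier 2 Sorbonne.py | existe_couples_divise
-- ===== SOURCE A (Python) =====
-- def existe_couples_divise(i,j):
--     nb_couples = 0
--     x = i
--     g = x+1
--     cpt = 0
--     while cpt < j-i:
--         while g <=j:
--             if g%x ==0:
--                 nb_couples +=1
--             g = g+1
--         x = x+1
--         g = x+1
--         cpt+= 1
--     return nb_couples>0
-- ===== SOURCE B (Python) =====
-- def existe_couples_divise(i, j):
--     # A pair (x, g) with i <= x, x < g <= j and x | g exists iff the smallest
--     # candidate multiple 2*i is already within range (for i >= 1).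
--     return 2 * i <= j
-- ===== Notes on version B (the rewrite author's own statement) =====
-- stated objective: simpler
-- what changed: Replaced the two nested counting loops by the one-line closed form 2*i <= j (for i >= 1 a divisor-multiple pair in (i..j) exists iff 2*i <= j).
-- outside the precondition, e.g. on existe_couples_divise(-3, -1): A returns False, B returns True; on existe_couples_divise(0, 5): A raises ZeroDivisionError, B returns True
import Mathlib
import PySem

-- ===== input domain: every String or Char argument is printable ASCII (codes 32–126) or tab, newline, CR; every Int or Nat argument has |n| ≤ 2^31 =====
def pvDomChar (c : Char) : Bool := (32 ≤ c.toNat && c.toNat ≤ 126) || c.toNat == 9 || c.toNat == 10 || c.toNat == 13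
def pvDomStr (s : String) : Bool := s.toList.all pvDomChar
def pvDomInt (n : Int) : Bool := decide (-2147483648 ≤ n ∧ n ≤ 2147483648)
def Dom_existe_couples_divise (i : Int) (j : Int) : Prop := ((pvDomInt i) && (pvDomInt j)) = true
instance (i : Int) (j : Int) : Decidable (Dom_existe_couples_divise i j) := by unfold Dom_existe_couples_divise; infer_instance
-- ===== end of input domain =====

-- B replaces A's two nested counting loops by the one-line closed form 2*i <= j (simpler).

-- ===== PORT A =====
-- inner 'while g <= j' loop of A: counts multiples of x among g..j on top of nb
def pvInnerA (x : Int) (g : Int) (j : Int) (nb : Int) : Int :=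
  if _h : g ≤ j then
    pvInnerA x (g + 1) j (if PySem.Int.mod g x = 0 then nb + 1 else nb)
  else nb
termination_by (j + 1 - g).toNat
decreasing_by omega

-- outer 'while cpt < j - i' loop of A
def pvOuterA (i : Int) (j : Int) (x : Int) (cpt : Int) (nb : Int) : Int :=
  if _h : cpt < j - i then
    pvOuterA i j (x + 1) (cpt + 1) (pvInnerA x (x + 1) j nb)
  else nb
termination_by (j - i - cpt).toNat
decreasing_by omega

def existe_couples_divise (i : Int) (j : Int) : Bool :=
  decide (0 < pvOuterA i j i 0 0)

-- ===== PORT B =====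
def existe_couples_divise_alt (i : Int) (j : Int) : Bool :=
  decide (2 * i ≤ j)

-- ===== PRECONDITION & SPEC =====
-- Pre_ restricts to the natural domain i >= 1 (ranges of positive integers): for i <= 0
-- the divisor x reaches 0 and A raises ZeroDivisionError whenever j >= 1, and A's values
-- on the remaining nonpositive corners are accidents of its negative-modulus loop.
def Pre_existe_couples_divise (i : Int) (_j : Int) : Prop := 1 ≤ i
instance (i : Int) (j : Int) : Decidable (Pre_existe_couples_divise i j) := by
  unfold Pre_existe_couples_divise; infer_instance

def pvWitness_existe_couples_divise : Int × Int := (2, 5)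

def Spec_existe_couples_divise (i : Int) (j : Int) (out : Bool) : Prop :=
  out = existe_couples_divise_alt i j
instance (i : Int) (j : Int) (out : Bool) : Decidable (Spec_existe_couples_divise i j out) := by
  unfold Spec_existe_couples_divise; infer_instance

-- ===== CLAIM (what is proved, stated in full; the proofs are below) =====
def Claim_equal_existe_couples_divise : Prop :=
  ∀ (i : Int) (j : Int), Dom_existe_couples_divise i j →
    Pre_existe_couples_divise i j →
    Spec_existe_couples_divise i j (existe_couples_divise i j)

-- ===== LEMMAS AND PROOFS =====

-- the inner loop never decreases the counter
theorem pvInnerA_le (x g j nb : Int) : nb ≤ pvInnerA x g j nb := by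
  rw [pvInnerA]
  split
  · refine le_trans ?_ (pvInnerA_le x (g + 1) j _)
    split <;> omega
  · exact le_refl nb
termination_by (j + 1 - g).toNat
decreasing_by omega

-- if some m in [g, j] is a multiple of x, the inner loop strictly increases the counter
theorem pvInnerA_lt (x g j nb m : Int) (hgm : g ≤ m) (hmj : m ≤ j)
    (hdvd : PySem.Int.mod m x = 0) : nb < pvInnerA x g j nb := by
  rw [pvInnerA]
  split
  · by_cases h0 : PySem.Int.mod g x = 0
    · simp only [h0, if_pos]
      exact lt_of_lt_of_le (by omega) (pvInnerA_le x (g + 1) j (nb + 1))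
    · have hne : g ≠ m := fun h => h0 (h ▸ hdvd)
      simp only [h0, if_false]
      exact pvInnerA_lt x (g + 1) j nb m (by omega) hmj hdvd
  · omega
termination_by (j + 1 - g).toNat
decreasing_by omega

-- for 1 ≤ x and j < 2*x the inner loop starting at x+1 finds no multiple
theorem pvInnerA_const (x g j nb : Int) (hx : 1 ≤ x) (hg : x < g) (hj : j < 2 * x) :
    pvInnerA x g j nb = nb := by
  rw [pvInnerA]
  split
  · rename_i hle
    have hnd : ¬ (x ∣ g) := by
      rintro ⟨c, hc⟩
      have h1 : x * 1 < x * c := by omega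
      have h2 : (1 : Int) < c := lt_of_mul_lt_mul_left h1 (by omega)
      nlinarith
    have h0 : PySem.Int.mod g x ≠ 0 :=
      fun h => hnd ((PySem.Int.mod_eq_zero_iff_dvd g x).mp h)
    simp only [h0, if_false]
    exact pvInnerA_const x (g + 1) j nb hx (by omega) hj
  · rfl
termination_by (j + 1 - g).toNat
decreasing_by omega

-- when every iteration's divisor x exceeds j/2 the outer loop changes nothing
theorem pvOuterA_const (i j x cpt nb : Int) (hx : 1 ≤ x) (hj : j < 2 * x) :
    pvOuterA i j x cpt nb = nb := by
  rw [pvOuterA]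
  split
  · rw [pvInnerA_const x (x + 1) j nb hx (by omega) hj]
    exact pvOuterA_const i j (x + 1) (cpt + 1) nb (by omega) (by omega)
  · rfl
termination_by (j - i - cpt).toNat
decreasing_by omega

-- the outer loop never decreases the counter
theorem pvOuterA_le (i j x cpt nb : Int) : nb ≤ pvOuterA i j x cpt nb := by
  rw [pvOuterA]
  split
  · exact le_trans (pvInnerA_le x (x + 1) j nb) (pvOuterA_le i j (x + 1) (cpt + 1) _)
  · exact le_refl nb
termination_by (j - i - cpt).toNat
decreasing_by omega

-- ===== VERDICT (by name: the statement is the Claim_ definition above) =====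
theorem existe_couples_divise_spec : Claim_equal_existe_couples_divise := by
  intro i j _hdom hpre
  unfold Spec_existe_couples_divise existe_couples_divise existe_couples_divise_alt
  have hi : 1 ≤ i := hpre
  by_cases hcase : 2 * i ≤ j
  · -- loop runs at least once with x = i; 2*i is a multiple of i in (i, j]
    have h1 : 0 < pvOuterA i j i 0 0 := by
      rw [pvOuterA]
      have hrun : (0 : Int) < j - i := by omega
      simp only [dif_pos hrun]
      have hdvd : PySem.Int.mod (2 * i) i = 0 := by
        rw [PySem.Int.mod_eq_zero_iff_dvd]; exact ⟨2, mul_comm 2 i⟩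
      have h2 : (0 : Int) < pvInnerA i (i + 1) j 0 :=
        pvInnerA_lt i (i + 1) j 0 (2 * i) (by omega) hcase hdvd
      exact lt_of_lt_of_le h2 (pvOuterA_le i j (i + 1) 1 _)
    simp [h1, hcase]
  · have h1 : pvOuterA i j i 0 0 = 0 := pvOuterA_const i j i 0 0 hi (by omega)
    simp [h1, hcase]
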